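-- pv_equiv track=rewrite | github.com/leihuazhe/lc-solutions | python3/leetcode/editor/cn/15_ThreeSum.py | nextPointer
-- ===== SOURCE A (Python) =====
-- def nextPointer(l, r, nums):
--     while l < r:
--         if nums[l] == nums[l + 1]:
--             l += 1
--         elif nums[r] == nums[r - 1]:
--             r = r - 1
--         else:
--             l += 1
--             r -= 1
--             # should return
--             return l, r
--     return l, r
-- ===== SOURCE B (Python) =====
-- def nextPointer(l, r, nums):
--     # Closed-form via the set of value-change positions: collect in one pass
--     # every index j in [l, r) where nums[j] != nums[j+1].  A's pointer dance
--     # ends at the first change position +1 on the left and the last change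
--     # position on the right; with no change position the pointers meet.
--     breaks = [j for j in range(l, r) if nums[j] != nums[j + 1]]
--     if breaks:
--         return breaks[0] + 1, breaks[-1]
--     return (r, r) if l < r else (l, r)
-- ===== Notes on version B (the rewrite author's own statement) =====
-- stated objective: alternative
-- what changed: Instead of moving two pointers, B builds in one forward pass the list of value-change positions j in [l,r) with nums[j] != nums[j+1] and reads the answer off its first and last elements in closed form.
import Mathlib
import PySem

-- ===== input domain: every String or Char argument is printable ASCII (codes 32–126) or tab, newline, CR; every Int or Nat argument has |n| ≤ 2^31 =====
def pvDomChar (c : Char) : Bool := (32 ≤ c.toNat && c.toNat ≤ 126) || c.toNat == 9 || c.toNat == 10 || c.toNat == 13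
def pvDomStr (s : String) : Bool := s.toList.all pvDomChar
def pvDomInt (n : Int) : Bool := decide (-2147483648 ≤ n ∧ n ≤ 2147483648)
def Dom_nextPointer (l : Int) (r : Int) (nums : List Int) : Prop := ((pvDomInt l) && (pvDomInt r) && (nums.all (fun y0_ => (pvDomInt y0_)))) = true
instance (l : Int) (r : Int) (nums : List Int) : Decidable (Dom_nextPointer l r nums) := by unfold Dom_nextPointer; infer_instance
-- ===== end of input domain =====

-- B replaces A's pointer movement by one forward pass collecting the value-change positions
-- and reads the answer off the first and last of them (objective: alternative algorithm);
-- equivalence of the RETURN values is proved on Pre_.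

-- ===== PORT A =====
-- A's single while-loop; nums[i] is Python indexing (negative wrap); inside Pre_ every
-- access succeeds, so the .getD 0 default is never the value used.
def nextPointer (l : Int) (r : Int) (nums : List Int) : Int × Int :=
  if _h : l < r then
    if (PySem.List.pyGet? nums l).getD 0 = (PySem.List.pyGet? nums (l + 1)).getD 0 then
      nextPointer (l + 1) r nums
    else if (PySem.List.pyGet? nums r).getD 0 = (PySem.List.pyGet? nums (r - 1)).getD 0 then
      nextPointer l (r - 1) nums
    else
      (l + 1, r - 1)
  else (l, r)
termination_by (r - l).toNat
decreasing_by all_goals omega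

-- ===== PORT B =====
-- Source B's comprehension: [j for j in range(l, r) if nums[j] != nums[j + 1]]
def changeBreaks (l : Int) (r : Int) (nums : List Int) : List Int :=
  (PySem.List.pyRange l r 1).filter
    (fun j => !((PySem.List.pyGet? nums j).getD 0 == (PySem.List.pyGet? nums (j + 1)).getD 0))

def nextPointer_alt (l : Int) (r : Int) (nums : List Int) : Int × Int :=
  match changeBreaks l r nums with
  | [] => if l < r then (r, r) else (l, r)                                     -- no change position: pointers meet
  | b0 :: rest => (b0 + 1, (b0 :: rest).getLast (List.cons_ne_nil b0 rest))    -- breaks[0] + 1, breaks[-1]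

-- ===== PRECONDITION & SPEC =====
-- Exactly the inputs on which Python A returns: when l < r the loop only ever indexes
-- positions between l and r, so A returns iff -len ≤ l and r < len; otherwise it raises
-- IndexError. When l ≥ r no element is accessed at all.
def Pre_nextPointer (l : Int) (r : Int) (nums : List Int) : Prop :=
  l < r → (-(nums.length : Int) ≤ l ∧ r < (nums.length : Int))
instance (l : Int) (r : Int) (nums : List Int) : Decidable (Pre_nextPointer l r nums) := by
  unfold Pre_nextPointer; infer_instance

def pvWitness_nextPointer : Int × Int × List Int := (0, 2, [1, 1, 2])

def Spec_nextPointer (l : Int) (r : Int) (nums : List Int) (out : Int × Int) : Prop := out = nextPointer_alt l r nums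
instance (l : Int) (r : Int) (nums : List Int) (out : Int × Int) : Decidable (Spec_nextPointer l r nums out) := by unfold Spec_nextPointer; infer_instance

-- ===== CLAIM (what is proved, stated in full; the proofs are below) =====
def Claim_equal_nextPointer : Prop := ∀ (l : Int) (r : Int) (nums : List Int), Dom_nextPointer l r nums → Pre_nextPointer l r nums → Spec_nextPointer l r nums (nextPointer l r nums)

-- ===== LEMMAS AND PROOFS =====

theorem brk_nil (l r : Int) (nums : List Int) (h : ¬ l < r) :
    changeBreaks l r nums = [] := by
  unfold changeBreaks
  rw [PySem.List.pyRange_one_eq_nil (by omega)]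
  rfl

-- l < r and nums[l] == nums[l+1]: the break list is unchanged when l steps forward
theorem brk_step_left (l r : Int) (nums : List Int) (h : l < r)
    (he : (PySem.List.pyGet? nums l).getD 0 = (PySem.List.pyGet? nums (l + 1)).getD 0) :
    changeBreaks l r nums = changeBreaks (l + 1) r nums := by
  unfold changeBreaks
  rw [PySem.List.pyRange_one_cons h, List.filter_cons]
  simp [he]

-- l < r and nums[l] != nums[l+1]: l itself heads the break list
theorem brk_cons (l r : Int) (nums : List Int) (h : l < r)
    (he : ¬ (PySem.List.pyGet? nums l).getD 0 = (PySem.List.pyGet? nums (l + 1)).getD 0) :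
    changeBreaks l r nums = l :: changeBreaks (l + 1) r nums := by
  unfold changeBreaks
  rw [PySem.List.pyRange_one_cons h, List.filter_cons]
  simp [he]

-- split off the top index r-1 of the range
theorem brk_split_top (l r : Int) (nums : List Int) (h : l < r) :
    changeBreaks l r nums = changeBreaks l (r - 1) nums ++
      (if (PySem.List.pyGet? nums r).getD 0 = (PySem.List.pyGet? nums (r - 1)).getD 0
       then [] else [r - 1]) := by
  unfold changeBreaks
  rw [PySem.List.pyRange_one_append l (r - 1) r (by omega) (by omega), List.filter_append]
  have hx : r - 1 + 1 = r := by omega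
  have h1 : PySem.List.pyRange (r - 1) r 1 = [r - 1] := by
    have h0 := PySem.List.pyRange_one_singleton (r - 1)
    rwa [hx] at h0
  rw [h1, List.filter_cons, List.filter_nil]
  congr 1
  by_cases hE : (PySem.List.pyGet? nums r).getD 0 = (PySem.List.pyGet? nums (r - 1)).getD 0
  · have hE' : (PySem.List.pyGet? nums (r - 1)).getD 0 = (PySem.List.pyGet? nums r).getD 0 := hE.symm
    simp [hx, hE']
  · have hE' : ¬ (PySem.List.pyGet? nums (r - 1)).getD 0 = (PySem.List.pyGet? nums r).getD 0 := fun h => hE h.symm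
    simp [hx, hE', hE]

-- B returns (l, r) whenever l ≥ r
theorem alt_of_not_lt (l r : Int) (nums : List Int) (h : ¬ l < r) :
    nextPointer_alt l r nums = (l, r) := by
  unfold nextPointer_alt
  rw [brk_nil l r nums h]
  simp [h]

-- The two programs return the same pair on every input (the .getD 0 defaults used where
-- Python would raise coincide, since both ports read the same positions the same way).
theorem nextPointer_eq_alt (l r : Int) (nums : List Int) :
    nextPointer l r nums = nextPointer_alt l r nums := by
  by_cases hlr : l < r
  · generalize hk : (r - l).toNat = k
    induction k generalizing l r with
    | zero => omega
    | succ k ih =>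
      rw [nextPointer]
      by_cases hL : (PySem.List.pyGet? nums l).getD 0 = (PySem.List.pyGet? nums (l + 1)).getD 0
      · -- A steps l; B's break list is unchanged
        simp only [hlr, dif_pos, if_pos hL]
        have hbrk := brk_step_left l r nums hlr hL
        by_cases h2 : l + 1 < r
        · rw [ih (l + 1) r h2 (by omega)]
          unfold nextPointer_alt
          rw [← hbrk]
          cases hc : changeBreaks l r nums with
          | nil => simp [hlr, h2]
          | cons b0 rest => rfl
        · -- l + 1 = r: A returns (r, r); B's break list is empty
          rw [nextPointer]
          simp only [h2, dite_false]
          have hc0 : changeBreaks l r nums = [] := by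
            rw [hbrk]; exact brk_nil (l + 1) r nums h2
          unfold nextPointer_alt
          rw [hc0]
          simp [hlr]
          omega
      · -- l is a break position
        have hhead := brk_cons l r nums hlr hL
        by_cases hR : (PySem.List.pyGet? nums r).getD 0 = (PySem.List.pyGet? nums (r - 1)).getD 0
        · -- A steps r down; B's break list is unchanged
          simp only [hlr, dif_pos, if_neg hL, if_pos hR]
          have hsplit := brk_split_top l r nums hlr
          rw [if_pos hR, List.append_nil] at hsplit
          by_cases h2 : l < r - 1
          · rw [ih l (r - 1) h2 (by omega)]
            unfold nextPointer_alt
            rw [← hsplit, hhead]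
          · -- r - 1 ≤ l < r forces r - 1 = l, but l is a break while brk l (r-1) = []
            exfalso
            have hnil : changeBreaks l (r - 1) nums = [] := brk_nil l (r - 1) nums h2
            rw [hnil, hhead] at hsplit
            exact List.cons_ne_nil _ _ hsplit
        · -- both tests fail: A returns (l+1, r-1); B's first break is l, last is r-1
          simp only [hlr, dif_pos, if_neg hL, if_neg hR]
          have hsplit := brk_split_top l r nums hlr
          rw [if_neg hR] at hsplit
          unfold nextPointer_alt
          cases hc : changeBreaks l r nums with
          | nil => rw [hc] at hhead; exact absurd hhead.symm (List.cons_ne_nil _ _)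
          | cons b0 rest =>
              have hcc : b0 :: rest = l :: changeBreaks (l + 1) r nums := by
                rw [← hc, hhead]
              obtain ⟨hb0, -⟩ := List.cons_eq_cons.mp hcc
              have happ : b0 :: rest = changeBreaks l (r - 1) nums ++ [r - 1] := by
                rw [← hc, hsplit]
              have hq : (b0 :: rest).getLast? = some (r - 1) := by
                rw [happ]; simp
              have hlast : (b0 :: rest).getLast (List.cons_ne_nil b0 rest) = r - 1 := by
                have h3 := List.getLast?_eq_some_getLast (l := b0 :: rest) (List.cons_ne_nil b0 rest)
                rw [h3] at hq
                exact Option.some.inj hq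
              subst hb0
              simp [hlast]
  · rw [nextPointer]
    simp only [hlr, dite_false]
    rw [alt_of_not_lt l r nums hlr]

-- ===== VERDICT (by name: the statement is the Claim_ definition above) =====
theorem nextPointer_spec : Claim_equal_nextPointer := by
  intro l r nums _ _
  unfold Spec_nextPointer
  exact nextPointer_eq_alt l r nums
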